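-- pv_equiv track=rewrite | github.com/Its-suLav-D/dynamicProgramming | nice_team.py | nice_team
-- ===== SOURCE A (Python) =====
-- def nice_team(arr,min_difference):
--     unique = set()
--
--     pairs = 0
--     for i in range(len(arr)):
--         current_num = arr[i]
--         if arr[i] not in unique:
--             for j in range(0,i):
--                 if abs(current_num - arr[j]) == min_difference:
--                     pairs+=1
--         unique.add(arr[i])
--
--     return pairs
-- ===== SOURCE B (Python) =====
-- def nice_team(arr, min_difference):
--     # One pass: running multiset of values seen so far; when a value is seen
--     # for the first time, earlier partners at distance d are the earlier
--     # copies of v-d and v+d. |x| = d is unsatisfiable for negative d.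
--     if min_difference < 0:
--         return 0
--     counts = {}
--     pairs = 0
--     for v in arr:
--         if counts.get(v, 0) == 0:
--             pairs += counts.get(v - min_difference, 0) + counts.get(v + min_difference, 0)
--         counts[v] = counts.get(v, 0) + 1
--     return pairs
-- ===== Notes on version B (the rewrite author's own statement) =====
-- stated objective: faster
-- what changed: Replaced A's per-first-occurrence rescan of the whole prefix by a single pass that maintains a running dict of value counts and looks up v-d and v+d when a value is first seen (returning 0 immediately for negative d, where |x|=d is unsatisfiable).
import Mathlib
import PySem

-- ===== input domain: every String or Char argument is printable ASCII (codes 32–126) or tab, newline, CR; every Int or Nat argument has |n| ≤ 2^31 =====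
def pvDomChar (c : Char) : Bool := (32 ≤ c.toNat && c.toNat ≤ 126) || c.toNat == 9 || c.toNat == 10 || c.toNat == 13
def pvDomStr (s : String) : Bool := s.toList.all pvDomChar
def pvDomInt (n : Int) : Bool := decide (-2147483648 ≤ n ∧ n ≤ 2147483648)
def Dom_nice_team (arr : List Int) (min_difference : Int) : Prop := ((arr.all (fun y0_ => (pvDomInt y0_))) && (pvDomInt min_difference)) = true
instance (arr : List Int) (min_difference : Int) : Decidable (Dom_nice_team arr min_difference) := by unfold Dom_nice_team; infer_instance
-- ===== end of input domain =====

-- B replaces A's quadratic rescan of the prefix by a single pass with a running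
-- counter dict, looking up v-d and v+d when a value is first seen (alternative
-- algorithm; measurably faster on large inputs).

-- ===== PORT A =====
-- inner loop 'for j in range(0, i): if abs(current_num - arr[j]) == min_difference: pairs += 1'
def ntInnerA (arr : List Int) (min_difference current_num : Int) (pairs i : Int) : Int :=
  (PySem.List.pyRange 0 i 1).foldl
    (fun pairs j =>
      if |current_num - PySem.List.pyGetD arr j 0| = min_difference then pairs + 1 else pairs)
    pairs

-- body of 'for i in range(len(arr))', state = (unique, pairs)
def ntStepA (arr : List Int) (min_difference : Int)
    (st : PySem.Set Int × Int) (i : Int) : PySem.Set Int × Int :=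
  let current_num := PySem.List.pyGetD arr i 0
  let pairs :=
    if !(st.1.contains (PySem.List.pyGetD arr i 0)) then
      ntInnerA arr min_difference current_num st.2 i
    else st.2
  (st.1.add (PySem.List.pyGetD arr i 0), pairs)

def nice_team (arr : List Int) (min_difference : Int) : Int :=
  ((PySem.List.pyRange 0 (arr.length : Int) 1).foldl
    (ntStepA arr min_difference) (PySem.Set.empty, 0)).2

-- ===== PORT B =====
-- body of 'for v in arr', state = (counts, pairs)
def ntStepB (min_difference : Int)
    (st : PySem.Dict Int Int × Int) (v : Int) : PySem.Dict Int Int × Int :=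
  let counts := st.1
  let pairs :=
    if counts.getD v 0 = 0 then
      st.2 + counts.getD (v - min_difference) 0 + counts.getD (v + min_difference) 0
    else st.2
  (counts.insert v (counts.getD v 0 + 1), pairs)

def nice_team_alt (arr : List Int) (min_difference : Int) : Int :=
  if min_difference < 0 then 0
  else (arr.foldl (ntStepB min_difference) (PySem.Dict.empty, 0)).2

-- ===== PRECONDITION & SPEC =====
def Spec_nice_team (arr : List Int) (min_difference : Int) (out : Int) : Prop := out = nice_team_alt arr min_difference
instance (arr : List Int) (min_difference : Int) (out : Int) : Decidable (Spec_nice_team arr min_difference out) := by unfold Spec_nice_team; infer_instance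

-- ===== CLAIM (what is proved, stated in full; the proofs are below) =====
def Claim_equal_nice_team : Prop := ∀ (arr : List Int) (min_difference : Int), Dom_nice_team arr min_difference → Spec_nice_team arr min_difference (nice_team arr min_difference)

-- ===== LEMMAS AND PROOFS =====

-- common middle form: walk the list keeping the processed prefix explicit
def ntMid (d : Int) : List Int → PySem.Set Int → Int → List Int → Int
  | _pre, _seen, pairs, [] => pairs
  | pre, seen, pairs, v :: rest =>
      ntMid d (pre ++ [v]) (seen.add v)
        (if seen.contains v then pairs
         else pairs + ((pre.countP (fun x => |v - x| = d)) : Int)) rest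

-- A's inner loop counts the matching elements of the processed prefix
lemma ntInnerA_eq (pre rest : List Int) (d c pairs : Int) :
    ntInnerA (pre ++ rest) d c pairs (pre.length : Int)
      = pairs + ((pre.countP (fun x => |c - x| = d)) : Int) := by
  unfold ntInnerA
  rw [PySem.List.foldl_congr_mem _ _
      (fun pairs j => if |c - PySem.List.pyGetD pre j 0| = d then pairs + 1 else pairs) _
      (by
        intro acc j hj
        have hj' := (PySem.List.mem_pyRange_one).1 hj
        show (if |c - PySem.List.pyGetD (pre ++ rest) j 0| = d then acc + 1 else acc)
           = (if |c - PySem.List.pyGetD pre j 0| = d then acc + 1 else acc)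
        have h2 : j < ((pre ++ rest).length : Int) := by
          have : (pre ++ rest).length = pre.length + rest.length := by
            simp
          omega
        rw [PySem.List.pyGetD_eq_getElem _ _ hj'.1 h2,
            PySem.List.pyGetD_eq_getElem _ _ hj'.1 hj'.2,
            List.getElem_append_left (by omega)])]
  rw [PySem.List.foldl_pyRange_zero_pyGetD' pre 0
      (fun pairs x => if |c - x| = d then pairs + 1 else pairs) pairs]
  have h := PySem.List.foldl_count_if (fun x => decide (|c - x| = d)) pre pairs
  simpa using h

-- A's outer loop, started after the prefix, is ntMid
lemma foldA_eq (d : Int) : ∀ (rest pre : List Int) (seen : PySem.Set Int) (pairs : Int),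
    ((PySem.List.pyRange (pre.length : Int) (((pre ++ rest).length : Nat) : Int) 1).foldl
        (ntStepA (pre ++ rest) d) (seen, pairs)).2
      = ntMid d pre seen pairs rest := by
  intro rest
  induction rest with
  | nil =>
    intro pre seen pairs
    rw [List.append_nil, PySem.List.pyRange_one_eq_nil (le_refl _)]
    rfl
  | cons v rest ih =>
    intro pre seen pairs
    have hab : (pre.length : Int) < (((pre ++ v :: rest).length : Nat) : Int) := by
      have : (pre ++ v :: rest).length = pre.length + (rest.length + 1) := by simp
      omega
    rw [PySem.List.pyRange_one_cons hab, List.foldl_cons]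
    have hget : PySem.List.pyGetD (pre ++ v :: rest) (pre.length : Int) 0 = v := by
      rw [PySem.List.pyGetD_eq_getElem _ _ (by omega)
            (by
              have : (pre ++ v :: rest).length = pre.length + (rest.length + 1) := by simp
              omega)]
      simp
    have hstep : ntStepA (pre ++ v :: rest) d (seen, pairs) (pre.length : Int)
        = (seen.add v,
           if seen.contains v then pairs
           else pairs + ((pre.countP (fun x => |v - x| = d)) : Int)) := by
      unfold ntStepA
      rw [hget]
      cases hc : seen.contains v
      · simp [ntInnerA_eq pre (v :: rest) d v pairs]
      · simp
    rw [hstep, ntMid]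
    have hl : pre ++ v :: rest = (pre ++ [v]) ++ rest := by simp
    have hlen : (pre.length : Int) + 1 = ((pre ++ [v]).length : Int) := by simp
    rw [hl, hlen]
    exact ih (pre ++ [v]) (seen.add v) _

-- the counting identity behind B's dict lookups
lemma countP_abs (v d : Int) (pre : List Int) (hd : 0 ≤ d) (hv : v ∉ pre) :
    ((pre.countP (fun x => |v - x| = d)) : Int)
      = (pre.count (v - d) : Int) + (pre.count (v + d) : Int) := by
  induction pre with
  | nil => simp
  | cons x pre ih =>
    simp only [List.mem_cons, not_or] at hv
    have ih2 := ih hv.2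
    rw [List.countP_cons, List.count_cons, List.count_cons]
    have hvx : v ≠ x := hv.1
    push_cast
    simp only [decide_eq_true_eq, abs_eq hd, beq_iff_eq] at ih2 ⊢
    rw [ih2]
    split_ifs <;> omega

-- B's loop is ntMid, given the counter invariant
lemma foldB_eq (d : Int) (hd : 0 ≤ d) :
    ∀ (rest pre : List Int) (counts : PySem.Dict Int Int) (pairs : Int),
    (∀ v, counts.getD v 0 = (pre.count v : Int)) →
    (rest.foldl (ntStepB d) (counts, pairs)).2
      = ntMid d pre (PySem.Set.ofList pre) pairs rest := by
  intro rest
  induction rest with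
  | nil => intro pre counts pairs hinv; rfl
  | cons v rest ih =>
    intro pre counts pairs hinv
    rw [List.foldl_cons, ntMid, ← PySem.Set.ofList_append_singleton]
    have hinv2 : ∀ w, (counts.insert v (counts.getD v 0 + 1)).getD w 0
        = (((pre ++ [v]).count w : Nat) : Int) := by
      intro w
      rw [PySem.Dict.getD_insert]
      by_cases hw : w = v
      · simp [hw, hinv, List.count_append]
      · have hw2 : ¬ v = w := fun h => hw h.symm
        simp [hw, hw2, hinv, List.count_append]
    have hcont : (PySem.Set.ofList pre).contains v = true ↔ v ∈ pre := by
      rw [PySem.Set.contains_iff]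
      exact PySem.Set.mem_ofList pre v
    have hstep : ntStepB d (counts, pairs) v
        = (counts.insert v (counts.getD v 0 + 1),
           if (PySem.Set.ofList pre).contains v then pairs
           else pairs + ((pre.countP (fun x => |v - x| = d)) : Int)) := by
      unfold ntStepB
      by_cases hv : v ∈ pre
      · have h0 : counts.getD v 0 ≠ 0 := by
          rw [hinv v]
          simpa [List.count_eq_zero] using hv
        simp [h0, hv]
      · have h0 : counts.getD v 0 = 0 := by
          rw [hinv v]
          simp [List.count_eq_zero, hv]
        rw [countP_abs v d pre hd hv]
        simp [h0, hv, hinv, add_assoc]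
    rw [hstep]
    exact ih (pre ++ [v]) _ _ hinv2

-- for a negative difference no pair ever matches
lemma ntMid_neg (d : Int) (hd : d < 0) :
    ∀ (rest pre : List Int) (seen : PySem.Set Int) (pairs : Int),
    ntMid d pre seen pairs rest = pairs := by
  intro rest
  induction rest with
  | nil => intro pre seen pairs; rfl
  | cons v rest ih =>
    intro pre seen pairs
    rw [ntMid, ih]
    have h0 : pre.countP (fun x => |v - x| = d) = 0 :=
      List.countP_eq_zero.mpr (by
        intro x _
        simp only [decide_eq_true_eq]
        have := abs_nonneg (v - x)
        omega)
    split <;> simp [h0]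

-- ===== VERDICT (by name: the statement is the Claim_ definition above) =====
theorem nice_team_spec : Claim_equal_nice_team := by
  intro arr d _
  unfold Spec_nice_team
  have hA : nice_team arr d = ntMid d [] PySem.Set.empty 0 arr := by
    have := foldA_eq d arr [] PySem.Set.empty 0
    simpa [nice_team] using this
  by_cases hd : d < 0
  · simp [nice_team_alt, hd, hA, ntMid_neg d hd]
  · rw [not_lt] at hd
    have hB := foldB_eq d hd arr [] PySem.Dict.empty 0 (by intro v; simp [PySem.Dict.getD])
    simp [nice_team_alt, not_lt.mpr hd, hA, hB]
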